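-- pv_equiv track=rewrite | github.com/luc-demeyer/noviat-apps | account_bank_statement_voucher/wizard/update_partner_record.py | calc_iban_checksum
-- ===== SOURCE A (Python) =====
-- def calc_iban_checksum(country, bban):
--     bban = bban.replace(' ', '').upper() + country.upper() + '00'
--     base = ''
--     for c in bban:
--         if c.isdigit():
--             base += c
--         else:
--             base += str(ord(c) - ord('A') + 10)
--     kk = 98 - int(base) % 97
--     return str(kk).rjust(2, '0')
-- ===== SOURCE B (Python) =====
-- def calc_iban_checksum(country, bban):
--     s = bban.replace(' ', '').upper() + country.upper() + '00'
--     digits = [int(ch) for c in s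
--               for ch in (c if c.isdigit() else str(ord(c) - 55))]
--     rem = 0
--     for d in digits:
--         rem = (rem * 10 + d) % 97
--     return '%02d' % (98 - rem)
-- ===== Notes on version B (the rewrite author's own statement) =====
-- stated objective: faster
-- what changed: Instead of concatenating all mapped digits into one huge decimal string and reducing the resulting big integer mod 97, B first flattens the input into a list of single digit values and then runs one Horner fold keeping a running remainder mod 97 with constant-size arithmetic.
-- outside the precondition, e.g. on calc_iban_checksum('', '!'): A returns '67', B raises ValueError; on calc_iban_checksum('', '! 1'): A returns '82', B raises ValueError
import Mathlib
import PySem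

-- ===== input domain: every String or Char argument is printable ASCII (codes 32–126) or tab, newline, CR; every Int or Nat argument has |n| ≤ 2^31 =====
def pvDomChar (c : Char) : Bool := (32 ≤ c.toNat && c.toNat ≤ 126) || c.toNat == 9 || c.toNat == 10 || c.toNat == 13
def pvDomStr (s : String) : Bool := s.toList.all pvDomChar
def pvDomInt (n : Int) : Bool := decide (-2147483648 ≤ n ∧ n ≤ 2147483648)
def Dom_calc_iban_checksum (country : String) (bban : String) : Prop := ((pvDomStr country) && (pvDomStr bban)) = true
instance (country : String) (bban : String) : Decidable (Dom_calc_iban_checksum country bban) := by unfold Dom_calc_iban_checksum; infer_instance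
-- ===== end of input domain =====

-- B replaces A's "build one huge decimal string, convert it with int(), reduce mod 97" by a staged
-- pipeline: flatten the input to a list of single digit VALUES, then one Horner fold keeping a
-- running remainder mod 97 (objective: faster — constant-size arithmetic instead of a big integer).

-- ===== PORT A =====
def calc_iban_checksum (country : String) (bban : String) : String :=
  -- bban = bban.replace(' ', '').upper() + country.upper() + '00'
  let bban2 : List Char :=
    PySem.Chars.upper (PySem.Chars.replace bban.toList [' '] []) ++
      PySem.Chars.upper country.toList ++ ['0', '0']
  -- base accumulated by the for-loop
  let base : List Char :=
    bban2.foldl (fun base c =>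
      if PySem.Chars.isdigit c then base ++ [c]
      else base ++ PySem.Int.toChars ((c.toNat : Int) - ('A'.toNat : Int) + 10)) []
  -- kk = 98 - int(base) % 97   (int(base) raises where ofChars? = none; excluded by Pre_)
  let kk : Int := 98 - PySem.Int.mod ((PySem.Int.ofChars? base).getD 0) 97
  -- str(kk).rjust(2, '0') ported by hand: left-pad with '0' to width 2 (exact for any string)
  let ks : List Char := PySem.Int.toChars kk
  String.ofList (List.replicate (2 - ks.length) '0' ++ ks)

-- ===== PORT B =====
def calc_iban_checksum_alt (country : String) (bban : String) : String :=
  let s : List Char :=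
    PySem.Chars.upper (PySem.Chars.replace bban.toList [' '] []) ++
      PySem.Chars.upper country.toList ++ ['0', '0']
  -- digits = [int(ch) for c in s for ch in (c if c.isdigit() else str(ord(c) - 55))]
  -- (int(ch) raises on '-'; those inputs are excluded by Pre_)
  let digits : List Int :=
    s.flatMap (fun c =>
      (if PySem.Chars.isdigit c then [c] else PySem.Int.toChars ((c.toNat : Int) - 55)).map
        (fun ch => (PySem.Int.ofChars? [ch]).getD 0))
  let rem : Int := digits.foldl (fun rem d => PySem.Int.mod (rem * 10 + d) 97) 0
  -- '%02d' % (98 - rem) ported by hand: 0 ≤ rem ≤ 96 always, so 98 - rem is 1 or 2 digits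
  let ks : List Char := PySem.Int.toChars (98 - rem)
  String.ofList (if ks.length < 2 then '0' :: ks else ks)

-- ===== PRECONDITION & SPEC =====
-- Pre_ excludes inputs whose mapped numeric string contains a '-' (i.e. some remaining character
-- with code < 48, e.g. punctuation or a space in `country`): there Python A raises ValueError on
-- int(), except in the accidental case where the lone '-' lands at the very front and A parses a
-- negative number; B raises ValueError on those inputs.
def Pre_calc_iban_checksum (country : String) (bban : String) : Prop :=
  (PySem.Chars.upper (PySem.Chars.replace bban.toList [' '] []) ++
      PySem.Chars.upper country.toList).all (fun c => decide (48 ≤ c.toNat)) = true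
instance (country : String) (bban : String) : Decidable (Pre_calc_iban_checksum country bban) := by
  unfold Pre_calc_iban_checksum; infer_instance

def pvWitness_calc_iban_checksum : String × String := ("BE", "123")

def Spec_calc_iban_checksum (country : String) (bban : String) (out : String) : Prop :=
  out = calc_iban_checksum_alt country bban
instance (country : String) (bban : String) (out : String) :
    Decidable (Spec_calc_iban_checksum country bban out) := by
  unfold Spec_calc_iban_checksum; infer_instance

-- ===== CLAIM (what is proved, stated in full; the proofs are below) =====
def Claim_equal_calc_iban_checksum : Prop :=
  ∀ (country : String) (bban : String), Dom_calc_iban_checksum country bban →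
    Pre_calc_iban_checksum country bban →
    Spec_calc_iban_checksum country bban (calc_iban_checksum country bban)

-- ===== LEMMAS AND PROOFS =====

lemma isDigit_iff (c : Char) : c.isDigit = true ↔ (48 ≤ c.toNat ∧ c.toNat ≤ 57) := by
  constructor
  · intro h
    simp [Char.isDigit] at h
    exact ⟨h.1, h.2⟩
  · intro h
    simp [Char.isDigit]
    exact ⟨UInt32.le_iff_toNat_le.mpr h.1, UInt32.le_iff_toNat_le.mpr h.2⟩

-- every ASCII digit character is one of the ten literals
lemma digit_mem (c : Char) (h : c.isDigit = true) :
    c ∈ ['0','1','2','3','4','5','6','7','8','9'] := by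
  have h1 : 48 ≤ c.toNat ∧ c.toNat ≤ 57 := by
    simp [Char.isDigit] at h; exact ⟨h.1, h.2⟩
  have hofn := Char.ofNat_toNat c
  obtain ⟨hl, hr⟩ := h1
  interval_cases h2 : c.toNat <;> rw [← hofn] <;> decide

lemma dropWhile_digits (xs : List Char) (h : ∀ c ∈ xs, c.isDigit = true) :
    List.dropWhile PySem.Int.isIntSpace xs = xs := by
  cases xs with
  | nil => rfl
  | cons c rest =>
    rw [List.dropWhile_cons_of_neg]
    have hm := digit_mem c (h c (by simp))
    fin_cases hm <;> decide

-- handles on the (private) digit-run parser inside PySem.Int.ofChars?: p is the digits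
-- reader, g its accumulator loop; the equations below are all we need about them
lemma exg : ∃ (p : List Char → Option Nat) (g : List Char → Bool → Nat → Option Nat),
    (∀ ds : List Char, (∀ c ∈ ds, c.isDigit = true) → ds ≠ [] →
      PySem.Int.ofChars? ds = Option.map (fun n => n) (do
        let a ← p ds
        pure ((a : Int)))) ∧
    (∀ (c : Char) (rest : List Char), c.isDigit = true →
      p (c :: rest) = g rest true (c.toNat - 48)) ∧
    (∀ (b : Bool) (a : Nat), g [] b a = if b = true then some a else none) ∧
    (∀ (c : Char) (rest : List Char) (b : Bool) (a : Nat), c.isDigit = true →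
      g (c :: rest) b a = g rest true (a * 10 + (c.toNat - 48))) := by
  refine ⟨?p, ?g, ?conn, ?link, ?e0, ?eS⟩
  case conn =>
    intro ds hd hne
    simp only [PySem.Int.ofChars?]
    rw [dropWhile_digits ds hd]
    rw [dropWhile_digits ds.reverse (by intro x hx; exact hd x (by simpa using hx))]
    rw [List.reverse_reverse]
    split
    · exact absurd (hd '-' (by simp)) (by decide)
    · exact absurd (hd '+' (by simp)) (by decide)
    · exact Eq.refl _
  case link =>
    intro c rest hc
    have hm := digit_mem c hc
    fin_cases hm <;> (conv_lhs => whnf) <;> exact Eq.refl _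
  case e0 =>
    intro b a
    conv_lhs => whnf
    rfl
  case eS =>
    intro c rest b a hc
    have hm := digit_mem c hc
    fin_cases hm <;> (conv_lhs => whnf) <;> (conv_rhs => whnf) <;> rfl

-- int(s) on a nonempty all-digit string: most-significant-first Horner fold
lemma ofChars_digits (ds : List Char) (hd : ∀ c ∈ ds, c.isDigit = true) (hne : ds ≠ []) :
    PySem.Int.ofChars? ds =
      some ((ds.foldl (fun a c => a * 10 + (c.toNat - 48)) 0 : Nat) : Int) := by
  obtain ⟨p, g, conn, link, e0, eS⟩ := exg
  have gtrue : ∀ (xs : List Char), (∀ c ∈ xs, c.isDigit = true) → ∀ (a : Nat),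
      g xs true a = some (xs.foldl (fun a c => a * 10 + (c.toNat - 48)) a) := by
    intro xs
    induction xs with
    | nil => intro _ a; rw [e0]; simp
    | cons c rest ih =>
      intro h a
      rw [eS c rest true a (h c (by simp))]
      rw [ih (fun x hx => h x (by simp [hx])) (a * 10 + (c.toNat - 48))]
      simp [List.foldl]
  obtain ⟨c, rest, rfl⟩ := List.exists_cons_of_ne_nil hne
  rw [conn _ hd hne, link c rest (hd c (by simp)),
    gtrue rest (fun x hx => hd x (by simp [hx])) (c.toNat - 48)]
  simp [List.foldl]

-- the per-character token (proof-side notation, written as A writes it)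
def pvToken (c : Char) : List Char :=
  if PySem.Chars.isdigit c then [c]
  else PySem.Int.toChars ((c.toNat : Int) - ('A'.toNat : Int) + 10)

-- B's token expression equals A's
lemma token55 (c : Char) :
    (if PySem.Chars.isdigit c then [c]
      else PySem.Int.toChars ((c.toNat : Int) - 55)) = pvToken c := by
  unfold pvToken
  have hA : ('A'.toNat : Int) = 65 := by decide
  have : (c.toNat : Int) - 55 = (c.toNat : Int) - ('A'.toNat : Int) + 10 := by omega
  rw [this]

lemma isdigit_eq (c : Char) : PySem.Chars.isdigit c = c.isDigit := by
  simp [PySem.Chars.isdigit, Char.isDigit, ge_iff_le, Char.le_def]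
  rfl

lemma token_digits (c : Char) (h : 48 ≤ c.toNat) :
    (∀ x ∈ pvToken c, x.isDigit = true) ∧ pvToken c ≠ [] := by
  unfold pvToken
  by_cases hc : PySem.Chars.isdigit c = true
  · rw [if_pos hc]
    refine ⟨?_, by simp⟩
    intro x hx
    simp at hx
    subst hx
    rw [← isdigit_eq]; exact hc
  · rw [if_neg hc]
    have hnd : ¬ (48 ≤ c.toNat ∧ c.toNat ≤ 57) := by
      rw [← isDigit_iff]
      intro hcon
      rw [← isdigit_eq] at hcon
      exact hc hcon
    have hnn : ¬ ((c.toNat : Int) - ('A'.toNat : Int) + 10 < 0) := by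
      have h58 : 58 ≤ c.toNat := by omega
      have hA : ('A'.toNat : Int) = 65 := by decide
      omega
    rw [PySem.Int.toChars, if_neg hnn]
    constructor
    · intro x hx
      exact Nat.isDigit_of_mem_toDigits (by norm_num) (by norm_num) hx
    · have hpos := Nat.length_toDigits_pos
        (b := 10) (n := ((c.toNat : Int) - ('A'.toNat : Int) + 10).toNat)
      intro hcon
      rw [hcon] at hpos
      simp at hpos

-- A's string-building loop is the concatenation of the tokens
lemma foldA_eq_flatMap (l : List Char) (init : List Char) :
    l.foldl (fun base c =>
        if PySem.Chars.isdigit c then base ++ [c]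
        else base ++ PySem.Int.toChars ((c.toNat : Int) - ('A'.toNat : Int) + 10)) init =
      init ++ l.flatMap pvToken := by
  induction l generalizing init with
  | nil => simp
  | cons c rest ih =>
    simp only [List.foldl, List.flatMap_cons]
    by_cases hc : PySem.Chars.isdigit c = true
    · rw [if_pos hc]
      rw [ih]
      simp [pvToken, if_pos hc]
    · rw [if_neg hc]
      rw [ih]
      simp [pvToken, if_neg hc]

-- int(ch) of a single digit character
lemma ofChars_single (ch : Char) (h : ch.isDigit = true) :
    (PySem.Int.ofChars? [ch]).getD 0 = ((ch.toNat : Int) - 48) := by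
  have hm := digit_mem ch h
  fin_cases hm <;> decide

-- the Horner fold's remainder depends on the seed only through its remainder
lemma horner_mod_congr (ds : List Char) (r s : Int)
    (h : PySem.Int.mod r 97 = PySem.Int.mod s 97) :
    PySem.Int.mod (ds.foldl (fun a ch => a * 10 + ((ch.toNat : Int) - 48)) r) 97 =
      PySem.Int.mod (ds.foldl (fun a ch => a * 10 + ((ch.toNat : Int) - 48)) s) 97 := by
  induction ds generalizing r s with
  | nil => exact h
  | cons c rest ih =>
    simp only [List.foldl]
    apply ih
    have e : ∀ x : Int, PySem.Int.mod x 97 = x % 97 := fun x =>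
      PySem.Int.mod_eq_emod_of_pos (by norm_num)
    rw [e, e] at h
    rw [e, e]
    conv_lhs => rw [Int.add_emod, Int.mul_emod, h, ← Int.mul_emod, ← Int.add_emod]

-- running remainder = remainder of the Horner value (Int level)
lemma modfold (ds : List Char) (r : Int) :
    ds.foldl (fun rem ch => PySem.Int.mod (rem * 10 + ((ch.toNat : Int) - 48)) 97)
        (PySem.Int.mod r 97) =
      PySem.Int.mod (ds.foldl (fun a ch => a * 10 + ((ch.toNat : Int) - 48)) r) 97 := by
  induction ds generalizing r with
  | nil => rfl
  | cons c rest ih =>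
    simp only [List.foldl]
    rw [ih (PySem.Int.mod r 97 * 10 + ((c.toNat : Int) - 48))]
    apply horner_mod_congr
    have e : ∀ x : Int, PySem.Int.mod x 97 = x % 97 := fun x =>
      PySem.Int.mod_eq_emod_of_pos (by norm_num)
    rw [e, e, e]
    conv_lhs => rw [Int.add_emod, Int.mul_emod, Int.emod_emod_of_dvd _ dvd_rfl,
      ← Int.mul_emod, ← Int.add_emod]

-- Nat-level Horner value = Int-level Horner value on digit characters
lemma cast_fold (ds : List Char) (hd : ∀ c ∈ ds, c.isDigit = true) (a : Nat) :
    ((ds.foldl (fun a c => a * 10 + (c.toNat - 48)) a : Nat) : Int) =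
      ds.foldl (fun a c => a * 10 + ((c.toNat : Int) - 48)) (a : Int) := by
  induction ds generalizing a with
  | nil => rfl
  | cons c rest ih =>
    simp only [List.foldl]
    have h48 : 48 ≤ c.toNat := by
      have := hd c (by simp)
      simp [Char.isDigit] at this
      exact this.1
    rw [ih (fun x hx => hd x (by simp [hx]))]
    congr 1
    push_cast [Nat.cast_sub h48]
    ring

-- A's rjust-padding and B's one-'0' padding agree when the number is between 2 and 98
lemma pad_eq (n : Int) (h2 : 2 ≤ n) (h98 : n ≤ 98) :
    String.ofList (List.replicate (2 - (PySem.Int.toChars n).length) '0' ++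
        PySem.Int.toChars n) =
      String.ofList (if (PySem.Int.toChars n).length < 2 then '0' :: PySem.Int.toChars n
        else PySem.Int.toChars n) := by
  interval_cases n <;> decide

-- ===== VERDICT (by name: the statement is the Claim_ definition above) =====
theorem calc_iban_checksum_spec : Claim_equal_calc_iban_checksum := by
  intro country bban _hdom hpreb
  have hpre : ∀ c ∈ PySem.Chars.upper (PySem.Chars.replace bban.toList [' '] []) ++
      PySem.Chars.upper country.toList, 48 ≤ c.toNat := by
    intro c hc
    have := List.all_eq_true.mp hpreb c hc
    simpa using this
  unfold Spec_calc_iban_checksum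
  simp only [calc_iban_checksum, calc_iban_checksum_alt]
  -- shared processed character list
  set P0 : List Char := PySem.Chars.upper (PySem.Chars.replace bban.toList [' '] []) ++
      PySem.Chars.upper country.toList with hP0
  have hpre' : ∀ c ∈ P0 ++ ['0', '0'], 48 ≤ c.toNat := by
    intro c hc
    rcases List.mem_append.mp hc with h | h
    · exact hpre c h
    · have : c = '0' := by simpa using h
      simp [this]
  -- A's base is the token concatenation
  have hbase : (P0 ++ ['0', '0']).foldl (fun base c =>
      if PySem.Chars.isdigit c then base ++ [c]
      else base ++ PySem.Int.toChars ((c.toNat : Int) - ('A'.toNat : Int) + 10)) [] =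
      (P0 ++ ['0', '0']).flatMap pvToken := by
    rw [foldA_eq_flatMap]; rfl
  set base : List Char := (P0 ++ ['0', '0']).flatMap pvToken with hbdef
  have hdig : ∀ c ∈ base, c.isDigit = true := by
    intro c hc
    rw [hbdef] at hc
    obtain ⟨x, hx, hcx⟩ := List.mem_flatMap.mp hc
    exact (token_digits x (hpre' x hx)).1 c hcx
  have hne : base ≠ [] := by
    rw [hbdef]
    intro hcon
    have : '0' ∈ P0 ++ ['0', '0'] := by simp
    have h0 : pvToken '0' = [] := List.flatMap_eq_nil_iff.mp hcon '0' this
    exact absurd h0 (by decide)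
  -- A's parsed integer
  have hparse := ofChars_digits base hdig hne
  -- B's digit list is the per-character int() image of A's base
  have hdigits : (P0 ++ ['0', '0']).flatMap (fun c =>
      (if PySem.Chars.isdigit c then [c]
        else PySem.Int.toChars ((c.toNat : Int) - 55)).map
        (fun ch => (PySem.Int.ofChars? [ch]).getD 0)) =
      base.map (fun ch => (PySem.Int.ofChars? [ch]).getD 0) := by
    rw [hbdef, List.map_flatMap]
    exact List.flatMap_congr (fun c _ => by rw [token55])
  -- B's remainder equals A's big-integer remainder
  have hrem : (base.map (fun ch => (PySem.Int.ofChars? [ch]).getD 0)).foldl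
      (fun rem d => PySem.Int.mod (rem * 10 + d) 97) 0 =
      PySem.Int.mod ((base.foldl (fun a c => a * 10 + (c.toNat - 48)) 0 : Nat) : Int) 97 := by
    rw [List.foldl_map]
    have hcong : base.foldl (fun rem ch =>
        PySem.Int.mod (rem * 10 + (PySem.Int.ofChars? [ch]).getD 0) 97) 0 =
        base.foldl (fun rem ch =>
        PySem.Int.mod (rem * 10 + ((ch.toNat : Int) - 48)) 97) 0 := by
      apply PySem.List.foldl_congr_mem
      intro acc x hx
      rw [ofChars_single x (hdig x hx)]
    rw [hcong]
    have h0 : (0 : Int) = PySem.Int.mod 0 97 := by decide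
    rw [h0, modfold, cast_fold base hdig 0]
    rfl
  -- the common remainder and its bounds
  set R : Int := PySem.Int.mod
      ((base.foldl (fun a c => a * 10 + (c.toNat - 48)) 0 : Nat) : Int) 97 with hR
  have hRe : R = ((base.foldl (fun a c => a * 10 + (c.toNat - 48)) 0 : Nat) : Int) % 97 := by
    rw [hR, PySem.Int.mod_eq_emod_of_pos (by norm_num)]
  have hR0 : 0 ≤ R := by rw [hRe]; exact Int.emod_nonneg _ (by norm_num)
  have hR96 : R < 97 := by rw [hRe]; exact Int.emod_lt_of_pos _ (by norm_num)
  rw [hbase, hparse, hdigits, hrem]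
  simp only [Option.getD_some]
  rw [← hR]
  exact pad_eq (98 - R) (by omega) (by omega)
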